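-- pv_equiv track=rewrite | github.com/maticstric/ecs235a-aes | differential_cryptanalysis/spn.py | split_nibbles_into_bits
-- ===== SOURCE A (Python) =====
-- def split_nibbles_into_bits(nibble_array):
--     bit_array = []
--
--     for nibble in nibble_array:
--         bit_array.append((nibble >> 3) & 1)
--         bit_array.append((nibble >> 2) & 1)
--         bit_array.append((nibble >> 1) & 1)
--         bit_array.append(nibble & 1)
--
--     return bit_array
-- ===== SOURCE B (Python) =====
-- def split_nibbles_into_bits(nibble_array):
--     return [int(c) for nibble in nibble_array for c in format(nibble % 16, '04b')]
-- ===== Notes on version B (the rewrite author's own statement) =====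
-- stated objective: idiomatic
-- what changed: Replaces the explicit accumulator loop with four shift-and-mask appends per nibble by a single flat comprehension that masks each nibble to its low 4 bits (% 16) and emits the digits of its fixed-width binary string rendering.
import Mathlib
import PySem

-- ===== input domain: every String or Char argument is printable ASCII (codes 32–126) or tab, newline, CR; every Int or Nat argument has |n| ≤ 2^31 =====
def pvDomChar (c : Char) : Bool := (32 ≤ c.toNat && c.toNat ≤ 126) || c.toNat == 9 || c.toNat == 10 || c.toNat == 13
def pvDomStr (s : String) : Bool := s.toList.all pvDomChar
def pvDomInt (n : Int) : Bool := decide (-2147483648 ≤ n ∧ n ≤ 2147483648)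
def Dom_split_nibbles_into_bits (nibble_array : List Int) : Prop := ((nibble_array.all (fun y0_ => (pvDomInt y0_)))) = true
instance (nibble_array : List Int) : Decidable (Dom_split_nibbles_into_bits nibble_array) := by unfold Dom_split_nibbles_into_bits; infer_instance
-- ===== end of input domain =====

-- B replaces A's explicit accumulator loop (four shift-and-mask appends per nibble)
-- by a flat comprehension rendering each nibble's low 4 bits (% 16) as a 4-digit binary string.


-- ===== PORT A =====
def split_nibbles_into_bits (nibble_array : List Int) : List Int :=
  nibble_array.foldl
    (fun (bit_array : List Int) (nibble : Int) =>
      bit_array ++ [PySem.Int.band (nibble >>> (3:Nat)) 1,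
                    PySem.Int.band (nibble >>> (2:Nat)) 1,
                    PySem.Int.band (nibble >>> (1:Nat)) 1,
                    PySem.Int.band nibble 1])
    []

-- ===== PORT B =====
-- format(m, '04b') for m in 0..15, ported by hand as its four binary digit characters (exact on 0..15)
def fmt04b (m : Int) : List Char :=
  [if m / 8 % 2 = 1 then '1' else '0',
   if m / 4 % 2 = 1 then '1' else '0',
   if m / 2 % 2 = 1 then '1' else '0',
   if m % 2 = 1 then '1' else '0']

-- int(c) for c a binary digit character (exact on '0'/'1')
def binDigitToInt (c : Char) : Int := if c = '1' then 1 else 0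

def split_nibbles_into_bits_alt (nibble_array : List Int) : List Int :=
  nibble_array.flatMap (fun nibble => (fmt04b (PySem.Int.mod nibble 16)).map binDigitToInt)

-- ===== PRECONDITION & SPEC =====
def Spec_split_nibbles_into_bits (nibble_array : List Int) (out : List Int) : Prop := out = split_nibbles_into_bits_alt nibble_array
instance (nibble_array : List Int) (out : List Int) : Decidable (Spec_split_nibbles_into_bits nibble_array out) := by unfold Spec_split_nibbles_into_bits; infer_instance

-- ===== CLAIM (what is proved, stated in full; the proofs are below) =====
def Claim_equal_split_nibbles_into_bits : Prop := ∀ (nibble_array : List Int), Dom_split_nibbles_into_bits nibble_array → Spec_split_nibbles_into_bits nibble_array (split_nibbles_into_bits nibble_array)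

-- ===== LEMMAS AND PROOFS =====

-- the four bits A extracts from one nibble are B's rendering of that nibble
theorem per_nibble_eq (n : Int) :
    [PySem.Int.band (n >>> (3:Nat)) 1, PySem.Int.band (n >>> (2:Nat)) 1,
     PySem.Int.band (n >>> (1:Nat)) 1, PySem.Int.band n 1]
    = (fmt04b (PySem.Int.mod n 16)).map binDigitToInt := by
  have hb : ∀ a : Int, PySem.Int.band a 1 = a % 2 := fun a => by
    rw [PySem.Int.band_one]; exact PySem.Int.mod_eq_emod_of_pos (by norm_num)
  have h3 : n >>> (3:Nat) = n / 8 := by simpa using @Int.shiftRight_eq_div_pow n 3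
  have h2 : n >>> (2:Nat) = n / 4 := by simpa using @Int.shiftRight_eq_div_pow n 2
  have h1 : n >>> (1:Nat) = n / 2 := by simpa using @Int.shiftRight_eq_div_pow n 1
  have hm : PySem.Int.mod n 16 = n % 16 := PySem.Int.mod_eq_emod_of_pos (by norm_num)
  have hif : ∀ a : Int, binDigitToInt (if a % 2 = 1 then '1' else '0') = a % 2 := fun a => by
    unfold binDigitToInt; split <;> simp_all <;> omega
  rw [hm]
  simp only [fmt04b, List.map, hif, hb, h3, h2, h1, List.cons.injEq, and_true]
  refine ⟨by omega, by omega, by omega, by omega⟩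

-- ===== VERDICT (by name: the statement is the Claim_ definition above) =====
theorem split_nibbles_into_bits_spec : Claim_equal_split_nibbles_into_bits := by
  intro xs _
  unfold Spec_split_nibbles_into_bits split_nibbles_into_bits split_nibbles_into_bits_alt
  rw [PySem.List.foldl_append_eq_flatMap]
  simp only [List.nil_append]
  exact List.flatMap_congr (fun n _ => per_nibble_eq n)
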